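-- pv_equiv track=rewrite | github.com/imehtn/TIP_102 | Unit2/sess2/v1_standardproblems.py | count_endangered_species
-- ===== SOURCE A (Python) =====
-- def count_endangered_species(endangered_species, observed_species):
--     dct = {}
--     for species in observed_species:
--         if species in endangered_species:
--             if species not in dct:
--                 dct[species] = 0
--             dct[species] += 1
--
--     return sum(dct.values())
-- ===== SOURCE B (Python) =====
-- def count_endangered_species(endangered_species, observed_species):
--     # Tabulate observations once, then sum the counts of the distinct endangered species.
--     freq = {}
--     for s in observed_species:
--         freq[s] = freq.get(s, 0) + 1
--     total = 0
--     for s in set(endangered_species):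
--         total += freq.get(s, 0)
--     return total
-- ===== Notes on version B (the rewrite author's own statement) =====
-- stated objective: faster
-- what changed: B builds a frequency table of the observations in one pass and then sums the table counts over the distinct endangered species, replacing A's per-observation linear membership scan of the endangered list.
import Mathlib
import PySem

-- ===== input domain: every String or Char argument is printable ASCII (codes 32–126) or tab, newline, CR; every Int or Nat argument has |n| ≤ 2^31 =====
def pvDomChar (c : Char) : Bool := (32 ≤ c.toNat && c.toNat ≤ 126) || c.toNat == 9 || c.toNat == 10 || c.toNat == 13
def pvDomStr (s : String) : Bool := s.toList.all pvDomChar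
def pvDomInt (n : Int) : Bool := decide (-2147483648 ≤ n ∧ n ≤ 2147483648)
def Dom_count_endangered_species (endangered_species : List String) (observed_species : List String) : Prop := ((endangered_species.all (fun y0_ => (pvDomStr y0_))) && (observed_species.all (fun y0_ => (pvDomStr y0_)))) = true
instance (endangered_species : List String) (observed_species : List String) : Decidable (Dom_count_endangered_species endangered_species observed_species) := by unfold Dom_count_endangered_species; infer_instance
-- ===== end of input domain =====

-- B replaces A's per-observation linear scan of the endangered list by a frequency table
-- built in one pass, summed over the distinct endangered species (objective: faster).

-- ===== PORT A =====
def count_endangered_species (endangered_species : List String) (observed_species : List String) : Int :=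
  let dct : PySem.Dict String Int :=
    observed_species.foldl (fun d species =>
      if decide (species ∈ endangered_species) then
        let d' := if d.contains species then d else d.insert species 0
        d'.insert species (d'.getD species 0 + 1)
      else d) PySem.Dict.empty
  dct.values.sum

-- ===== PORT B =====
def count_endangered_species_alt (endangered_species : List String) (observed_species : List String) : Int :=
  let freq : PySem.Dict String Int :=
    observed_species.foldl (fun d s => d.insert s (d.getD s 0 + 1)) PySem.Dict.empty
  (PySem.Set.ofList endangered_species).foldl (fun total s => total + freq.getD s 0) 0

-- ===== PRECONDITION & SPEC =====
def Spec_count_endangered_species (endangered_species : List String) (observed_species : List String) (out : Int) : Prop := out = count_endangered_species_alt endangered_species observed_species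
instance (endangered_species : List String) (observed_species : List String) (out : Int) : Decidable (Spec_count_endangered_species endangered_species observed_species out) := by unfold Spec_count_endangered_species; infer_instance

-- ===== CLAIM (what is proved, stated in full; the proofs are below) =====
def Claim_equal_count_endangered_species : Prop := ∀ (endangered_species : List String) (observed_species : List String), Dom_count_endangered_species endangered_species observed_species → Spec_count_endangered_species endangered_species observed_species (count_endangered_species endangered_species observed_species)

-- ===== LEMMAS AND PROOFS =====

-- A's guarded step (initialise-to-0 then +=1) is the Counter increment step.
theorem pvStepEqModify (d : PySem.Dict String Int) (s : String) :
    (let d' := if d.contains s then d else d.insert s 0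
     d'.insert s (d'.getD s 0 + 1)) = d.modify s 0 (· + 1) := by
  by_cases h : d.contains s = true
  · simp only [h, if_pos]
    rfl
  · simp only [h, Bool.false_eq_true, if_neg, not_false_eq_true]
    rw [PySem.Dict.getD_insert_self, PySem.Dict.insert_insert_self,
        show d.modify s 0 (· + 1) = d.insert s (d.getD s 0 + 1) from rfl,
        PySem.Dict.getD_of_not_contains d 0 (by simpa using h)]

-- A fold whose step is guarded by `if p x` is the fold over the filtered list.
theorem pvFoldlFilter {α β : Type} (p : α → Bool) (g : β → α → β) :
    ∀ (l : List α) (a : β),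
      l.foldl (fun d x => if p x then g d x else d) a = (l.filter p).foldl g a := by
  intro l
  induction l with
  | nil => intro a; rfl
  | cons x l ih =>
    intro a
    by_cases h : p x = true <;> simp [h, ih]

-- Summing occurrence counts over a duplicate-free list of keys counts the members.
theorem pvCountPSplit (x : String) (u o : List String) (hx : x ∉ u) :
    o.countP (fun s => decide (s ∈ x :: u)) = o.count x + o.countP (fun s => decide (s ∈ u)) := by
  induction o with
  | nil => simp
  | cons y o ih =>
    rw [List.countP_cons, List.countP_cons, List.count_cons, ih]
    by_cases hyx : y = x
    · subst hyx
      simp [hx]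
      omega
    · by_cases hyu : y ∈ u
      · simp [hyx, hyu]
        omega
      · simp [hyx, hyu]

theorem pvSumCount (u o : List String) (hu : u.Nodup) :
    (u.map (fun s => (o.count s : Int))).sum = ((o.countP (fun s => decide (s ∈ u)) : Nat) : Int) := by
  induction u with
  | nil => simp
  | cons x u ih =>
    simp only [List.nodup_cons] at hu
    rw [List.map_cons, List.sum_cons, ih hu.2, pvCountPSplit x u o hu.1]
    push_cast
    ring

-- ===== VERDICT (by name: the statement is the Claim_ definition above) =====
theorem count_endangered_species_spec : Claim_equal_count_endangered_species := by
  intro e o _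
  unfold Spec_count_endangered_species count_endangered_species count_endangered_species_alt
  simp only []
  -- A side: the guarded loop is Counter of the filtered observations
  rw [show (fun (d : PySem.Dict String Int) species =>
        if decide (species ∈ e) = true then
          let d' := if d.contains species then d else d.insert species 0
          d'.insert species (d'.getD species 0 + 1)
        else d)
      = (fun (d : PySem.Dict String Int) species =>
        if decide (species ∈ e) = true then d.modify species 0 (· + 1) else d) from
      funext fun d => funext fun s => by by_cases h : decide (s ∈ e) = true <;>
        simp only [h, if_pos, if_neg, Bool.false_eq_true, not_false_eq_true, pvStepEqModify]]
  have hfold : List.foldl (fun (d : PySem.Dict String Int) species =>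
        if decide (species ∈ e) = true then d.modify species 0 (· + 1) else d)
        PySem.Dict.empty o
      = PySem.Dict.counter (o.filter (fun s => decide (s ∈ e))) := by
    rw [PySem.Dict.counter_eq_foldl]
    exact pvFoldlFilter (fun s => decide (s ∈ e))
      (fun (d : PySem.Dict String Int) x => d.modify x 0 (· + 1)) o PySem.Dict.empty
  rw [hfold]
  set fo := o.filter (fun s => decide (s ∈ e)) with hfo
  -- sum of the Counter's values
  have hA : (PySem.Dict.counter fo).values.sum
      = ((PySem.Set.ofList fo).map (fun k => (fo.count k : Int))).sum := by
    simp only [PySem.Dict.values, PySem.Dict.items_counter, List.map_map]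
    rfl
  -- B side: fold is a sum of table lookups, and each lookup is a count
  rw [hA, PySem.List.foldl_add, zero_add,
      show (fun s => (o.foldl (fun d s => d.insert s (d.getD s 0 + 1))
          PySem.Dict.empty).getD s 0) = (fun s => (o.count s : Int)) from
        funext fun s => by
          rw [PySem.Dict.getD_foldl_insert_add_one, PySem.Dict.getD_empty, zero_add]]
  rw [pvSumCount (PySem.Set.ofList fo) fo (PySem.Set.nodup_ofList fo),
      pvSumCount (PySem.Set.ofList e) o (PySem.Set.nodup_ofList e)]
  have h1 : fo.countP (fun s => decide (s ∈ PySem.Set.ofList fo)) = fo.length := by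
    apply List.countP_eq_length.2
    intro a ha
    simpa [PySem.Set.mem_ofList] using ha
  have h2 : o.countP (fun s => decide (s ∈ PySem.Set.ofList e))
      = o.countP (fun s => decide (s ∈ e)) := by
    apply List.countP_congr
    intro a _
    simp [PySem.Set.mem_ofList]
  rw [h1, h2, hfo, List.countP_eq_length_filter]
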